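-- pv_equiv track=rewrite | github.com/thomas-wright-bioinformatics/pep_genie | app/seq_studies.py | n_trunc
-- ===== SOURCE A (Python) =====
-- def n_trunc(sequence):
--     input_list = list(sequence)
--     clean_list=[]
--     for i in input_list:
--         if i != ' ':
--             clean_list.append(i)
--
--     output_list = [';N-terminal Truncation','\n',''.join(map(str, clean_list))+' ;Control','\n']
--     my_row = []
--     c=1
--     for i in range(0,len(clean_list)):
--         if c <= (len(clean_list)-5):
--             my_row.append(''.join(map(str, clean_list[c:len(clean_list)])))
--             my_row.append('\n')
--             c += 1
--             output_list.append(''.join(map(str, my_row)))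
--             my_row = []
--     return ''.join(map(str, output_list))
-- ===== SOURCE B (Python) =====
-- def n_trunc(sequence):
--     clean = ''.join(c for c in sequence if c != ' ')
--     n = len(clean)
--     rows = []
--     if n >= 6:
--         acc = clean[n - 5:]
--         rows.append(acc)
--         for c in reversed(range(1, n - 5)):
--             acc = clean[c] + acc
--             rows.append(acc)
--         rows.reverse()
--     return ';N-terminal Truncation\n' + clean + ' ;Control\n' + ''.join(r + '\n' for r in rows)
-- ===== Notes on version B (the rewrite author's own statement) =====
-- stated objective: alternative
-- what changed: B despaces with a filter comprehension and builds the suffixes incrementally from the shortest one, prepending one character at a time (O(total output) accumulator walk, reversed at the end), instead of A's counter-guarded loop over the whole sequence that re-slices and re-joins the tail from scratch at every index.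
import Mathlib
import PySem

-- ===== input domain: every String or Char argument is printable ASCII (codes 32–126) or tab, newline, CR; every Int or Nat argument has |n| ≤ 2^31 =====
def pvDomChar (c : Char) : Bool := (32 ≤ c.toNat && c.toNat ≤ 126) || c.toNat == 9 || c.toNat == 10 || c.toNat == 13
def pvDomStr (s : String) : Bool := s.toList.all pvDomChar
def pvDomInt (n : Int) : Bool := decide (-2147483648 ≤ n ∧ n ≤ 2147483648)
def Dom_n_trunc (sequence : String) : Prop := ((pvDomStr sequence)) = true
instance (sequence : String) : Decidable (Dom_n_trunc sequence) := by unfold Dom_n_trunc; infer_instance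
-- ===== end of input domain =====

-- B despaces with a filter and builds the suffixes back-to-front with a character-prepending
-- accumulator (reversing the collected rows once), instead of A's counter-guarded loop that
-- re-slices the tail at every position; objective: alternative decomposition, same exact output.

-- ===== PORT A =====
-- one loop iteration of A's 'for i in range(0, len(clean_list))' body; state = (output_list, c)
def nTruncStepA (clean : List Char) (st : List (List Char) × Int) (_i : Int) :
    List (List Char) × Int :=
  if st.2 ≤ (clean.length : Int) - 5 then
    let my_row : List (List Char) :=
      [PySem.List.slice clean (some st.2) (some (clean.length : Int)), ['\n']]
    (st.1 ++ [PySem.Chars.join [] my_row], st.2 + 1)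
  else st

def n_trunc (sequence : String) : String :=
  let input_list := sequence.toList
  let clean_list := input_list.foldl (fun acc i => if i != ' ' then acc ++ [i] else acc) ([] : List Char)
  let output_list : List (List Char) :=
    [";N-terminal Truncation".toList, ['\n'], clean_list ++ " ;Control".toList, ['\n']]
  let res := (PySem.List.pyRange 0 (clean_list.length : Int)).foldl
    (nTruncStepA clean_list) (output_list, (1 : Int))
  String.ofList (PySem.Chars.join [] res.1)

-- ===== PORT B =====
-- one iteration of B's 'for c in reversed(range(1, n - 5))'; state = (acc, rows)
def nTruncStepB (clean : List Char) (st : List Char × List (List Char)) (c : Int) :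
    List Char × List (List Char) :=
  let acc := (match PySem.List.pyGet? clean c with | some ch => [ch] | none => []) ++ st.1
  (acc, st.2 ++ [acc])

def n_trunc_alt (sequence : String) : String :=
  let clean := sequence.toList.filter (fun c => c != ' ')
  let n := clean.length
  let rows : List (List Char) :=
    if 6 ≤ n then
      let init := PySem.List.slice clean (some ((n : Int) - 5)) none
      let st := ((PySem.List.pyRange 1 ((n : Int) - 5)).reverse).foldl
        (nTruncStepB clean) (init, [init])
      st.2.reverse
    else []
  String.ofList (";N-terminal Truncation\n".toList ++ clean ++ " ;Control\n".toList
    ++ PySem.Chars.join [] (rows.map (fun r => r ++ ['\n'])))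

-- ===== PRECONDITION & SPEC =====
def Spec_n_trunc (sequence : String) (out : String) : Prop := out = n_trunc_alt sequence
instance (sequence : String) (out : String) : Decidable (Spec_n_trunc sequence out) := by unfold Spec_n_trunc; infer_instance

-- ===== CLAIM (what is proved, stated in full; the proofs are below) =====
def Claim_equal_n_trunc : Prop := ∀ (sequence : String), Dom_n_trunc sequence → Spec_n_trunc sequence (n_trunc sequence)

-- ===== LEMMAS AND PROOFS =====

lemma join_nil_eq_flatten (l : List (List Char)) : PySem.Chars.join [] l = l.flatten := by
  induction l with
  | nil => rfl
  | cons x t ih =>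
    cases t with
    | nil => simp [PySem.Chars.join, List.intercalate]
    | cons y s => simp_all [PySem.Chars.join, List.intercalate, List.intersperse]

lemma cleanA_eq (cs : List Char) :
    cs.foldl (fun acc i => if i != ' ' then acc ++ [i] else acc) ([] : List Char)
      = cs.filter (fun c => c != ' ') := by
  simpa using PySem.List.foldl_append_if (fun c => c != ' ') id cs []

-- A's loop, characterised: the output gathers clean.drop k ++ '\n' for k = j+1 .. len-5
lemma loopA (clean : List Char) : ∀ (l : List Int) (j : Nat) (out : List (List Char)),
    clean.length ≤ l.length + j + 5 →
    l.foldl (nTruncStepA clean) (out, (j : Int) + 1)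
      = (out ++ (List.range' (j+1) (clean.length - 5 - j)).map (fun k => clean.drop k ++ ['\n']),
         ((j + 1 + (clean.length - 5 - j) : Nat) : Int)) := by
  intro l
  induction l with
  | nil =>
    intro j out h
    simp only [List.length_nil] at h
    have h0 : clean.length - 5 - j = 0 := by omega
    simp only [List.foldl_nil, h0, List.range'_zero, List.map_nil, List.append_nil, Nat.add_zero]
    rw [Prod.mk.injEq]
    exact ⟨rfl, by omega⟩
  | cons x t ih =>
    intro j out h
    simp only [List.length_cons] at h
    by_cases hc : j + 6 ≤ clean.length
    · have hlt : ((j : Int) + 1) ≤ (clean.length : Int) - 5 := by omega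
      have hslice : PySem.List.slice clean (some ((j : Int) + 1)) (some (clean.length : Int))
          = clean.drop (j+1) := by
        have hcast : ((j : Int) + 1) = ((j + 1 : Nat) : Int) := by omega
        rw [hcast, PySem.List.slice_natCast]
        exact List.take_of_length_le (by simp)
      have hstep : nTruncStepA clean (out, (j : Int) + 1) x
          = (out ++ [clean.drop (j+1) ++ ['\n']], ((j + 1 : Nat) : Int) + 1) := by
        simp only [nTruncStepA, if_pos hlt, hslice, join_nil_eq_flatten, List.flatten,
          Prod.mk.injEq]
        exact ⟨by simp, by omega⟩
      rw [List.foldl_cons, hstep, ih (j+1) _ (by omega)]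
      have hr : List.range' (j+1) (clean.length - 5 - j)
          = (j+1) :: List.range' (j+2) (clean.length - 5 - (j+1)) := by
        have hn : clean.length - 5 - j = (clean.length - 5 - (j+1)) + 1 := by omega
        rw [hn, List.range'_succ]
      rw [hr, Prod.mk.injEq]
      constructor
      · simp
      · push_cast; omega
    · have hlt : ¬ (((j : Int) + 1) ≤ (clean.length : Int) - 5) := by omega
      rw [List.foldl_cons]
      have hid : nTruncStepA clean (out, (j : Int) + 1) x = (out, (j : Int) + 1) := by
        simp [nTruncStepA, hlt]
      rw [hid]
      exact ih j out (by omega)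

-- pyRange 1 (t+1) is the naturals 1..t
lemma pyRange_one_natCast (t : Nat) :
    PySem.List.pyRange 1 ((t : Int) + 1) = (List.range' 1 t).map (fun (k : Nat) => (k : Int)) := by
  induction t with
  | zero => decide
  | succ s ih =>
    have h1 : (1 : Int) ≤ (s : Int) + 1 := by omega
    have hcast : ((s + 1 : Nat) : Int) + 1 = ((s : Int) + 1) + 1 := by omega
    rw [hcast, PySem.List.pyRange_one_succ_right h1, ih, List.range'_concat]
    simp [Nat.add_comm]

-- B's loop, characterised: rows collect clean.drop k for k = j .. 1 on top of R
lemma loopB (clean : List Char) : ∀ (j : Nat) (R : List (List Char)), j < clean.length →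
    ((List.range' 1 j).reverse.map (fun (k : Nat) => (k : Int))).foldl
        (nTruncStepB clean) (clean.drop (j+1), R)
      = (clean.drop 1, R ++ ((List.range' 1 j).map (fun k => clean.drop k)).reverse) := by
  intro j
  induction j with
  | zero => intro R _; simp
  | succ s ih =>
    intro R hs
    rw [List.range'_concat, show 1 + 1 * s = s + 1 from by ring]
    have hget : PySem.List.pyGet? clean ((s + 1 : Nat) : Int) = some (clean[s+1]'hs) := by
      rw [PySem.List.pyGet?_natCast]
      exact List.getElem?_eq_getElem hs
    have h1 : [clean[s+1]'hs] ++ clean.drop (s+1+1) = clean.drop (s+1) := by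
      rw [List.singleton_append]
      exact List.getElem_cons_drop hs
    have hstep : nTruncStepB clean (clean.drop (s+1+1), R) ((s + 1 : Nat) : Int)
        = (clean.drop (s+1), R ++ [clean.drop (s+1)]) := by
      simp only [nTruncStepB, hget, Prod.mk.injEq]
      exact ⟨h1, by rw [h1]⟩
    rw [List.reverse_append, List.reverse_singleton, List.singleton_append, List.map_cons,
      List.foldl_cons, hstep, ih _ (by omega), List.map_append, List.reverse_append]
    simp

-- ===== VERDICT (by name: the statement is the Claim_ definition above) =====
theorem n_trunc_spec : Claim_equal_n_trunc := by
  intro sequence _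
  unfold Spec_n_trunc n_trunc n_trunc_alt
  simp only [cleanA_eq]
  generalize sequence.toList.filter (fun c => c != ' ') = clean
  have hh : (";N-terminal Truncation\n".toList : List Char)
      = ";N-terminal Truncation".toList ++ ['\n'] := by decide
  have hc2 : (" ;Control\n".toList : List Char) = " ;Control".toList ++ ['\n'] := by decide
  have hA := loopA clean ((List.range clean.length).map (fun (k : Nat) => (k : Int))) 0
    [";N-terminal Truncation".toList, ['\n'], clean ++ " ;Control".toList, ['\n']] (by simp)
  norm_num at hA
  rw [PySem.List.pyRange_zero_natCast, hA]
  by_cases h6 : 6 ≤ clean.length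
  · rw [if_pos h6,
      show ((clean.length : Int) - 5) = ((clean.length - 5 : Nat) : Int) from by omega,
      PySem.List.slice_from_natCast,
      show ((clean.length - 5 : Nat) : Int) = ((clean.length - 6 : Nat) : Int) + 1 from by omega,
      pyRange_one_natCast,
      show clean.length - 5 = (clean.length - 6) + 1 from by omega,
      ← List.map_reverse,
      loopB clean (clean.length - 6) _ (by omega),
      List.range'_concat, List.map_append]
    simp [join_nil_eq_flatten, hh, hc2, List.map_map, Function.comp_def, Nat.add_comm]
  · rw [if_neg h6]
    have h0 : clean.length - 5 = 0 := by omega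
    simp [h0, join_nil_eq_flatten, hh, hc2]
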